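-- pv_equiv track=rewrite | github.com/VictorMaxWang/AI_Hackathon_20260422 | app/agent/orchestrator.py | _continuous_final_status
-- ===== SOURCE A (Python) =====
-- from typing import Any
--
-- def _continuous_final_status(timeline: list[dict[str, Any]]) -> str:
--     statuses = [str(item.get("status")) for item in timeline]
--     if "refused" in statuses:
--         return "refused"
--     if "failed" in statuses:
--         return "failed"
--     if "aborted" in statuses:
--         return "aborted"
--     if statuses and all(status == "skipped" for status in statuses):
--         return "skipped"
--     return "success"
-- ===== SOURCE B (Python) =====
-- def _continuous_final_status(timeline):
--     any_item = saw_refused = saw_failed = saw_aborted = saw_non_skipped = False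
--     for item in timeline:
--         s = str(item.get("status"))
--         any_item = True
--         if s == "refused":
--             saw_refused = True
--         elif s == "failed":
--             saw_failed = True
--         elif s == "aborted":
--             saw_aborted = True
--         if s != "skipped":
--             saw_non_skipped = True
--     if saw_refused:
--         return "refused"
--     if saw_failed:
--         return "failed"
--     if saw_aborted:
--         return "aborted"
--     if any_item and not saw_non_skipped:
--         return "skipped"
--     return "success"
-- ===== Notes on version B (the rewrite author's own statement) =====
-- stated objective: alternative
-- what changed: Replaces the build-a-status-list-then-scan-it-four-times structure with a single accumulating pass that maintains five booleans and decides the result afterwards in the same priority order.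
import Mathlib
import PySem

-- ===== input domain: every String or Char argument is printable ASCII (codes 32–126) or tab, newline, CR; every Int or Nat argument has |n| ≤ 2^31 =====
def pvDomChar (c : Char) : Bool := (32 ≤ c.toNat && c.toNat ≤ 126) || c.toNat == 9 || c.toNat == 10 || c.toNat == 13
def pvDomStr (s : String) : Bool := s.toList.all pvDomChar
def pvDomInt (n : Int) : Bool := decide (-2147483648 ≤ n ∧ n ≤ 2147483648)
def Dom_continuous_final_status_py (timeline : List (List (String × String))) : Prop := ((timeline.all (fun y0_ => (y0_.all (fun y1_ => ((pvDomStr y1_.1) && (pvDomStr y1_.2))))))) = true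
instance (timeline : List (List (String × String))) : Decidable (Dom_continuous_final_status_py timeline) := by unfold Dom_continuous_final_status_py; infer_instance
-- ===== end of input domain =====

-- B replaces the build-status-list-then-four-scans structure with one accumulating pass over the timeline (alternative decomposition, same cost).

-- ===== PORT A =====
-- str(item.get("status")): first-match lookup in the association list; a missing key gives Python's str(None) = "None".
def pvStatusOf (item : List (String × String)) : String :=
  match item.find? (fun p => p.1 == "status") with
  | some p => p.2
  | none => "None"

def continuous_final_status_py (timeline : List (List (String × String))) : String :=
  let statuses := timeline.map pvStatusOf
  if statuses.contains "refused" then "refused"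
  else if statuses.contains "failed" then "failed"
  else if statuses.contains "aborted" then "aborted"
  else if !statuses.isEmpty && statuses.all (fun status => status == "skipped") then "skipped"
  else "success"

-- ===== PORT B =====
-- one step of B's loop: state = (any_item, saw_refused, saw_failed, saw_aborted, saw_non_skipped)
def pvStep (st : Bool × Bool × Bool × Bool × Bool) (item : List (String × String)) :
    Bool × Bool × Bool × Bool × Bool :=
  let s := pvStatusOf item
  let (_, r, f, ab, ns) := st
  let (r, f, ab) :=
    if s == "refused" then (true, f, ab)
    else if s == "failed" then (r, true, ab)
    else if s == "aborted" then (r, f, true)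
    else (r, f, ab)
  let ns := if s != "skipped" then true else ns
  (true, r, f, ab, ns)

def continuous_final_status_py_alt (timeline : List (List (String × String))) : String :=
  let (anyItem, r, f, ab, ns) := timeline.foldl pvStep (false, false, false, false, false)
  if r then "refused"
  else if f then "failed"
  else if ab then "aborted"
  else if anyItem && !ns then "skipped"
  else "success"

-- ===== PRECONDITION & SPEC =====
def Spec_continuous_final_status_py (timeline : List (List (String × String))) (out : String) : Prop := out = continuous_final_status_py_alt timeline
instance (timeline : List (List (String × String))) (out : String) : Decidable (Spec_continuous_final_status_py timeline out) := by unfold Spec_continuous_final_status_py; infer_instance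

-- ===== CLAIM (what is proved, stated in full; the proofs are below) =====
def Claim_equal_continuous_final_status_py : Prop := ∀ (timeline : List (List (String × String))), Dom_continuous_final_status_py timeline → Spec_continuous_final_status_py timeline (continuous_final_status_py timeline)

-- ===== LEMMAS AND PROOFS =====

-- B's fold computes exactly the four membership facts and the non-skipped test of A's status list.
theorem pvStep_foldl (tl : List (List (String × String))) (a r f ab ns : Bool) :
    tl.foldl pvStep (a, r, f, ab, ns) =
      (a || !tl.isEmpty,
       r || (tl.map pvStatusOf).contains "refused",
       f || (tl.map pvStatusOf).contains "failed",
       ab || (tl.map pvStatusOf).contains "aborted",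
       ns || (tl.map pvStatusOf).any (fun s => s != "skipped")) := by
  induction tl generalizing a r f ab ns with
  | nil => simp
  | cons hd t ih =>
    simp only [List.foldl_cons, pvStep]
    rw [ih]
    rcases eq_or_ne (pvStatusOf hd) "refused" with h1 | h1
    · simp [h1]
    · rcases eq_or_ne (pvStatusOf hd) "failed" with h2 | h2
      · simp [h2]
      · rcases eq_or_ne (pvStatusOf hd) "aborted" with h3 | h3
        · simp [h3]
        · rcases eq_or_ne (pvStatusOf hd) "skipped" with h4 | h4
          · simp [h4]
          · simp [h1, h2, h3, h4, Ne.symm h1, Ne.symm h2, Ne.symm h3]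

-- ===== VERDICT (by name: the statement is the Claim_ definition above) =====
theorem continuous_final_status_py_spec : Claim_equal_continuous_final_status_py := by
  intro tl _
  show continuous_final_status_py tl = continuous_final_status_py_alt tl
  unfold continuous_final_status_py continuous_final_status_py_alt
  rw [pvStep_foldl]
  simp only [Bool.false_or]
  by_cases h : (tl.map pvStatusOf).any (fun s => s != "skipped") = true <;>
    simp_all [List.all_eq_not_any_not]
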